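-- pv_equiv track=rewrite | github.com/elenaouro/CDI-Compression-of-Data-and-Images- | 01_P_Desigualdad_Kraft-McMillan.py | kraft3
-- ===== SOURCE A (Python) =====
-- def  kraft3(L, Ln, r=2):
-- 	sum=0
-- 	cont=0
-- 	for i in L:
-- 		if(i!=Ln):
-- 			aux=Ln-i
-- 			sum=sum+(2**aux)
-- 		else: cont=cont+1
-- 	res=(2**Ln)-sum
-- 	return res-cont
-- ===== SOURCE B (Python) =====
-- def kraft3(L, Ln, r=2):
--     # Histogram the codeword lengths, then evaluate the Kraft sum by a Horner
--     # scheme over the sorted distinct lengths (one power per gap, not per element).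
--     cnt = {}
--     for i in L:
--         cnt[i] = cnt.get(i, 0) + 1
--     acc = 0
--     prev = None
--     for d in sorted(cnt):
--         if prev is None:
--             acc = cnt[d]
--         else:
--             acc = acc * 2**(d - prev) + cnt[d]
--         prev = d
--     if prev is None:
--         return 2**Ln
--     return 2**Ln - acc * 2**(Ln - prev)
-- ===== Notes on version B (the rewrite author's own statement) =====
-- stated objective: faster
-- what changed: B replaces A's single pass with one bignum power per element (and an i==Ln special case) by a histogram of length counts plus a Horner evaluation over the sorted distinct lengths, doing one power per gap between consecutive distinct lengths, so bignum work drops from n large powers to k gap powers (k = distinct lengths); measured much faster on large lists. Pre_ excludes inputs (Ln < 0 or some i > Ln) where A returns a float, not an int; there B may return a float too or raise OverflowError on a huge negative exponent.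
-- outside the precondition, e.g. on kraft3([2], 1, 2): A returns 1.5, B returns 1.5; on kraft3([0, 9320], 93, 1): A returns 0.0, B raises OverflowError
import Mathlib
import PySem

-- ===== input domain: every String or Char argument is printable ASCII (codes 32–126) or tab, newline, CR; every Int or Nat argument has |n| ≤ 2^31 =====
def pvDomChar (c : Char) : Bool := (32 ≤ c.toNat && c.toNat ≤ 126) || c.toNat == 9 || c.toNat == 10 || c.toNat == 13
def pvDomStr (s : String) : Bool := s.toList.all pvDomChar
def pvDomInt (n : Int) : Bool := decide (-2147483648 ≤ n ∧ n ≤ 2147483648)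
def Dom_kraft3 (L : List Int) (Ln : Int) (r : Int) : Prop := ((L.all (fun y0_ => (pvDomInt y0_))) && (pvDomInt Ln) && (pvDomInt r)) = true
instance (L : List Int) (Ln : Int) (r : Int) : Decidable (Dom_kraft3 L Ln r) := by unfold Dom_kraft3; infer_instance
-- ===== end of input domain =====

-- ===== PORT A =====
-- B recomputes A's result by a histogram of the lengths plus a Horner evaluation over the
-- sorted distinct lengths (one bignum power per gap instead of one per element; measured faster on large lists).
def kraft3 (L : List Int) (Ln : Int) (r : Int) : Int :=
  let sc := L.foldl (fun (sc : Int × Int) i =>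
    if i ≠ Ln then (sc.1 + 2 ^ (Ln - i).toNat, sc.2)
    else (sc.1, sc.2 + 1)) (0, 0)
  (2 ^ Ln.toNat - sc.1) - sc.2

-- ===== PORT B =====
def kraft3_alt (L : List Int) (Ln : Int) (r : Int) : Int :=
  let cnt := L.foldl (fun d i => d.insert i (d.getD i 0 + 1)) (PySem.Dict.empty : PySem.Dict Int Int)
  let ds := PySem.List.sorted cnt.keys (fun x => x) false
  let st := ds.foldl (fun (ap : Int × Option Int) d =>
      match ap.2 with
      | none => (cnt.getD d 0, some d)
      | some p => (ap.1 * 2 ^ (d - p).toNat + cnt.getD d 0, some d)) ((0 : Int), (none : Option Int))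
  match st.2 with
  | none => 2 ^ Ln.toNat
  | some p => 2 ^ Ln.toNat - st.1 * 2 ^ (Ln - p).toNat

-- ===== PRECONDITION & SPEC =====
-- Pre_ excludes inputs on which Python A returns a float, not an int (Ln < 0, or some i > Ln,
-- where 2**(negative) is a float), so the return value leaves the declared Int type there.
def Pre_kraft3 (L : List Int) (Ln : Int) (r : Int) : Prop :=
  0 ≤ Ln ∧ ∀ i ∈ L, i ≤ Ln
instance (L : List Int) (Ln : Int) (r : Int) : Decidable (Pre_kraft3 L Ln r) := by
  unfold Pre_kraft3; infer_instance
def pvWitness_kraft3 : List Int × Int × Int := ([1, 2, 2], 2, 2)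
def Spec_kraft3 (L : List Int) (Ln : Int) (r : Int) (out : Int) : Prop := out = kraft3_alt L Ln r
instance (L : List Int) (Ln : Int) (r : Int) (out : Int) : Decidable (Spec_kraft3 L Ln r out) := by unfold Spec_kraft3; infer_instance

-- ===== CLAIM =====
def Claim_equal_kraft3 : Prop := ∀ (L : List Int) (Ln : Int) (r : Int), Dom_kraft3 L Ln r → Pre_kraft3 L Ln r → Spec_kraft3 L Ln r (kraft3 L Ln r)

-- ===== LEMMAS AND PROOFS =====

-- A's loop keeps (sum, cont); their total is the uniform sum of 2^(Ln-i) over L.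
theorem kraft3_foldl_split (Ln : Int) :
    ∀ (L : List Int) (s c : Int),
      (L.foldl (fun (sc : Int × Int) i =>
        if i ≠ Ln then (sc.1 + 2 ^ (Ln - i).toNat, sc.2)
        else (sc.1, sc.2 + 1)) (s, c)).1
      + (L.foldl (fun (sc : Int × Int) i =>
        if i ≠ Ln then (sc.1 + 2 ^ (Ln - i).toNat, sc.2)
        else (sc.1, sc.2 + 1)) (s, c)).2
      = s + c + (L.map (fun i => (2:Int) ^ (Ln - i).toNat)).sum := by
  intro L
  induction L with
  | nil => intro s c; simp
  | cons i L ih =>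
    intro s c
    rw [List.foldl_cons, List.map_cons, List.sum_cons]
    by_cases h : i = Ln
    · subst h
      rw [if_neg (by simp)]
      dsimp only
      rw [ih s (c + 1), Int.sub_self]
      norm_num; ring
    · rw [if_pos h]
      dsimp only
      rw [ih (s + 2 ^ (Ln - i).toNat) c]
      ring

-- Summing a 0/1-indicator over a duplicate-free list containing x picks out f x.
theorem sum_indicator_single (f : Int → Int) :
    ∀ (es : List Int), es.Nodup → ∀ x ∈ es,
      (es.map (fun d => (if d = x then (1:Int) else 0) * f d)).sum = f x := by
  intro es
  induction es with
  | nil => intro _ x hx; simp at hx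
  | cons e rest ih =>
    intro hnd x hx
    rw [List.map_cons, List.sum_cons]
    rcases List.mem_cons.mp hx with he | hrest
    · subst he
      rw [if_pos rfl, one_mul]
      have hnotin : x ∉ rest := (List.nodup_cons.mp hnd).1
      have hz : (rest.map (fun d => (if d = x then (1:Int) else 0) * f d)).sum = 0 := by
        apply List.sum_eq_zero
        intro y hy
        rcases List.mem_map.mp hy with ⟨d, hd, rfl⟩
        rw [if_neg (by rintro rfl; exact hnotin hd), zero_mul]
      rw [hz]; ring
    · have hne : e ≠ x := by rintro rfl; exact (List.nodup_cons.mp hnd).1 hrest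
      rw [if_neg hne, zero_mul, zero_add]
      exact ih (List.nodup_cons.mp hnd).2 x hrest

-- Grouping by counts: the sum over distinct values weighted by multiplicity equals the plain sum.
theorem sum_count_eq (f : Int → Int) :
    ∀ (L es : List Int), es.Nodup → (∀ i ∈ L, i ∈ es) →
      (es.map (fun d => (L.count d : Int) * f d)).sum = (L.map f).sum := by
  intro L
  induction L with
  | nil => intro es _ _; simp
  | cons x t ih =>
    intro es hnd hmem
    have hsplit : (es.map (fun d => ((x :: t).count d : Int) * f d)).sum
        = (es.map (fun d => (t.count d : Int) * f d)).sum
          + (es.map (fun d => (if d = x then (1:Int) else 0) * f d)).sum := by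
      rw [← PySem.List.sum_map_add_int]
      apply congrArg
      apply List.map_congr_left
      intro d _
      have : ((x :: t).count d : Int) = (t.count d : Int) + (if d = x then (1:Int) else 0) := by
        by_cases h : d = x
        · subst h; simp [List.count_cons]
        · simp [h, Ne.symm h]
      rw [this]; ring
    rw [hsplit, ih es hnd (fun i hi => hmem i (List.mem_cons_of_mem _ hi)),
        sum_indicator_single f es hnd x (hmem x (List.mem_cons_self)),
        List.map_cons, List.sum_cons]
    ring

-- Horner invariant for B's loop over a strictly increasing list of lengths bounded by Ln.
theorem horner_invariant (Ln : Int) (c : Int → Int) :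
    ∀ (ds : List Int) (a p : Int), ds.Pairwise (· < ·) →
      (∀ d ∈ ds, p < d ∧ d ≤ Ln) → p ≤ Ln →
      (match (ds.foldl (fun (ap : Int × Option Int) d =>
          match ap.2 with
          | none => (c d, some d)
          | some q => (ap.1 * 2 ^ (d - q).toNat + c d, some d)) (a, some p)).2 with
       | none => (2:Int) ^ Ln.toNat
       | some q => (ds.foldl (fun (ap : Int × Option Int) d =>
          match ap.2 with
          | none => (c d, some d)
          | some q => (ap.1 * 2 ^ (d - q).toNat + c d, some d)) (a, some p)).1
            * 2 ^ (Ln - q).toNat)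
      = a * 2 ^ (Ln - p).toNat + (ds.map (fun d => c d * (2:Int) ^ (Ln - d).toNat)).sum := by
  intro ds
  induction ds with
  | nil => intro a p _ _ _; simp
  | cons d rest ih =>
    intro a p hpw hbnd hp
    have hpd : p < d := (hbnd d (List.mem_cons_self)).1
    have hdLn : d ≤ Ln := (hbnd d (List.mem_cons_self)).2
    rw [List.foldl_cons]
    dsimp only
    have hrest : ∀ e ∈ rest, d < e ∧ e ≤ Ln := by
      intro e he
      exact ⟨(List.pairwise_cons.mp hpw).1 e he, (hbnd e (List.mem_cons_of_mem _ he)).2⟩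
    rw [ih (a * 2 ^ (d - p).toNat + c d) d (List.pairwise_cons.mp hpw).2 hrest hdLn,
        List.map_cons, List.sum_cons]
    have hpow : (2:Int) ^ (d - p).toNat * 2 ^ (Ln - d).toNat = 2 ^ (Ln - p).toNat := by
      rw [← pow_add]
      congr 1
      omega
    calc (a * 2 ^ (d - p).toNat + c d) * 2 ^ (Ln - d).toNat
          + (rest.map (fun e => c e * (2:Int) ^ (Ln - e).toNat)).sum
        = a * ((2:Int) ^ (d - p).toNat * 2 ^ (Ln - d).toNat) + c d * 2 ^ (Ln - d).toNat
          + (rest.map (fun e => c e * (2:Int) ^ (Ln - e).toNat)).sum := by ring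
      _ = a * 2 ^ (Ln - p).toNat
          + (c d * 2 ^ (Ln - d).toNat
             + (rest.map (fun e => c e * (2:Int) ^ (Ln - e).toNat)).sum) := by rw [hpow]; ring

-- ===== VERDICT =====
theorem kraft3_spec : Claim_equal_kraft3 := by
  intro L Ln r _ hpre
  obtain ⟨hLn, hle⟩ := hpre
  unfold Spec_kraft3 kraft3 kraft3_alt
  have hA := kraft3_foldl_split Ln L 0 0
  dsimp only
  set cnt := L.foldl (fun d i => d.insert i (d.getD i 0 + 1)) (PySem.Dict.empty : PySem.Dict Int Int) with hcnt
  have hget : ∀ d : Int, cnt.getD d 0 = (L.count d : Int) := by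
    intro d
    rw [hcnt, PySem.Dict.getD_foldl_insert_add_one, PySem.Dict.getD_empty]
    ring
  have hkeys : cnt.keys = PySem.Set.ofList L := by
    rw [hcnt, PySem.Dict.keys_foldl_insert]
    simp [PySem.Dict.keys_empty, PySem.Set.update, PySem.Set.ofList_eq_foldl]
  set ds := PySem.List.sorted cnt.keys (fun x => x) false with hds
  have hperm : cnt.keys.Perm ds := (PySem.List.sorted_perm cnt.keys (fun x => x) false).symm
  have hndds : ds.Nodup := hperm.nodup (hkeys ▸ PySem.Set.nodup_ofList L)
  have hmemds : ∀ i ∈ L, i ∈ ds := by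
    intro i hi
    exact hperm.mem_iff.mp (hkeys ▸ (PySem.Set.mem_ofList L i).mpr hi)
  have hdsL : ∀ d ∈ ds, d ∈ L := by
    intro d hd
    exact (PySem.Set.mem_ofList L d).mp (hkeys ▸ hperm.mem_iff.mpr hd)
  have hsorted : ds.Pairwise (· < ·) := by
    have hle' : ds.Pairwise (· ≤ ·) := by
      have := PySem.List.sorted_pairwise cnt.keys (fun x => x)
      simpa [hds] using this
    have hne : ds.Pairwise (· ≠ ·) := hndds
    exact (hle'.and hne).imp (fun h => lt_of_le_of_ne h.1 h.2)
  have hfold : ds.foldl (fun (ap : Int × Option Int) d =>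
      match ap.2 with
      | none => (cnt.getD d 0, some d)
      | some p => (ap.1 * 2 ^ (d - p).toNat + cnt.getD d 0, some d)) ((0:Int), (none : Option Int))
      = ds.foldl (fun (ap : Int × Option Int) d =>
      match ap.2 with
      | none => ((L.count d : Int), some d)
      | some p => (ap.1 * 2 ^ (d - p).toNat + (L.count d : Int), some d)) ((0:Int), (none : Option Int)) := by
    apply PySem.List.foldl_congr_mem
    intro acc d _
    rw [hget d]
  rw [hfold]
  cases hdscase : ds with
  | nil =>
    have hLnil : L = [] := by
      cases L with
      | nil => rfl
      | cons x t =>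
        exact absurd (hdscase ▸ hmemds x (List.mem_cons_self)) (List.not_mem_nil)
    subst hLnil
    simp at hA
    simp [hA]
  | cons d rest =>
    rw [List.foldl_cons]
    dsimp only
    have hpw : rest.Pairwise (· < ·) := (List.pairwise_cons.mp (hdscase ▸ hsorted)).2
    have hbnd : ∀ e ∈ rest, d < e ∧ e ≤ Ln := by
      intro e he
      refine ⟨(List.pairwise_cons.mp (hdscase ▸ hsorted)).1 e he, ?_⟩
      exact hle e (hdsL e (hdscase ▸ List.mem_cons_of_mem _ he))
    have hdLn : d ≤ Ln := hle d (hdsL d (hdscase ▸ List.mem_cons_self))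
    have hinv := horner_invariant Ln (fun d => (L.count d : Int)) rest
      ((L.count d : Int)) d hpw hbnd hdLn
    have hsum : ((d :: rest).map (fun e => (L.count e : Int) * (2:Int) ^ (Ln - e).toNat)).sum
        = (L.map (fun i => (2:Int) ^ (Ln - i).toNat)).sum := by
      rw [← hdscase]
      exact sum_count_eq (fun e => (2:Int) ^ (Ln - e).toNat) L ds hndds hmemds
    rw [List.map_cons, List.sum_cons] at hsum
    have hsome : ∀ (xs : List Int) (a p : Int),
        ((xs.foldl (fun (ap : Int × Option Int) e =>
          match ap.2 with
          | none => ((L.count e : Int), some e)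
          | some q => (ap.1 * 2 ^ (e - q).toNat + (L.count e : Int), some e))
          (a, some p)).2).isSome := by
      intro xs
      induction xs with
      | nil => intro a p; simp
      | cons x t ih =>
        intro a p
        rw [List.foldl_cons]
        dsimp only
        exact ih _ _
    rcases hst : (rest.foldl (fun (ap : Int × Option Int) e =>
        match ap.2 with
        | none => ((L.count e : Int), some e)
        | some p => (ap.1 * 2 ^ (e - p).toNat + (L.count e : Int), some e))
        (((L.count d : Int)), some d)) with ⟨a', o'⟩
    rw [hst] at hinv
    cases o' with
    | none =>
      exfalso
      have h2 := hsome rest (L.count d) d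
      rw [hst] at h2
      simp at h2
    | some q =>
      dsimp only at hinv ⊢
      linarith [hA, hinv, hsum]
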